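-- pv_equiv track=rewrite | github.com/cse-ai-lab/RealCQA | code/evaluation/eval_PMC.py | get_agg_tid
-- ===== SOURCE A (Python) =====
-- def get_agg_tid(tid_obj) :
--     at_ = ['1', '2', '3', '4']
--     agg_t = {}
--     for t_ in tid_obj :
--         _ = t_[:1]
--         k = at_.index(_)
--         if k+1 in agg_t :
--             agg_t[k+1]+= list(tid_obj[t_])
--         else :
--             agg_t[k+1]= list(tid_obj[t_])
--     return agg_t
-- ===== SOURCE B (Python) =====
-- def get_agg_tid(tid_obj):
--     at_ = ['1', '2', '3', '4']
--     groups = [at_.index(t_[:1]) + 1 for t_ in tid_obj]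
--     return {g: [x for t_, g_ in zip(tid_obj, groups) if g_ == g for x in tid_obj[t_]]
--             for g in dict.fromkeys(groups)}
-- ===== Notes on version B (the rewrite author's own statement) =====
-- stated objective: alternative
-- what changed: Replaced A's online single-pass dict accumulation with a two-phase group-major gather: compute every key's group index once, then build each group's aggregated list by one comprehension over the precomputed groups, emitting groups in first-occurrence order.
import Mathlib
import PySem

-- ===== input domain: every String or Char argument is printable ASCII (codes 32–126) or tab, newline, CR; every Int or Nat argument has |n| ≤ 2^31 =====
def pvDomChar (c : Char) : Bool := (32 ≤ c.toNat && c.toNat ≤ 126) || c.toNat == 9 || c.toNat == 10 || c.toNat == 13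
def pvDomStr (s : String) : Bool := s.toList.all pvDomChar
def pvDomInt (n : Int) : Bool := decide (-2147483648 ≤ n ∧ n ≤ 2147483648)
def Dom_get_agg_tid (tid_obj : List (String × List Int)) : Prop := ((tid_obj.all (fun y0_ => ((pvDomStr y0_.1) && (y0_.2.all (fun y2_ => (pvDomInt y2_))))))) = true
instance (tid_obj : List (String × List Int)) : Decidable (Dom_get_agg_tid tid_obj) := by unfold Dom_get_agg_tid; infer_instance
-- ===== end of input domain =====

-- B replaces A's online dict accumulation by a two-phase group-major gather (precompute every key's
-- group, then build each group's entry in one pass over the precomputed groups); same cost, no speed claim.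

-- ===== PORT A =====
def get_agg_tid (tid_obj : List (String × List Int)) : List (Int × List Int) :=
  let at_ : List String := ["1", "2", "3", "4"]
  let agg_t : PySem.Dict Int (List Int) :=
    tid_obj.foldl (fun agg_t t_ =>
      let u := PySem.Str.slice t_.1 none (some 1)       -- _ = t_[:1]
      match PySem.List.index? at_ u with                -- k = at_.index(_)
      | none => agg_t                                   -- ValueError: excluded by Pre_
      | some k =>
        if agg_t.contains ((k : Int) + 1) then          -- if k+1 in agg_t
          agg_t.insert ((k : Int) + 1)
            (agg_t.getD ((k : Int) + 1) [] ++ (PySem.Dict.mk tid_obj).getD t_.1 [])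
        else
          agg_t.insert ((k : Int) + 1) ((PySem.Dict.mk tid_obj).getD t_.1 []))
      PySem.Dict.empty
  agg_t.items

-- ===== PORT B =====
def get_agg_tid_alt (tid_obj : List (String × List Int)) : List (Int × List Int) :=
  let at_ : List String := ["1", "2", "3", "4"]
  let groups : List Int := tid_obj.map (fun t_ =>
    match PySem.List.index? at_ (PySem.Str.slice t_.1 none (some 1)) with
    | some k => (k : Int) + 1
    | none => 0)                                        -- ValueError: excluded by Pre_
  (PySem.List.dedup groups).map (fun g =>               -- dict.fromkeys(groups)
    (g, ((tid_obj.zip groups).filter (fun q => q.2 == g)).flatMap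
          (fun q => (PySem.Dict.mk tid_obj).getD q.1.1 [])))

-- ===== PRECONDITION & SPEC =====
-- Pre_ excludes (a) keys whose first character is not one of '1'..'4' (including the empty key), on
-- which A raises ValueError, and (b) association lists with duplicate keys, a representation no
-- Python dict argument can have (dict() collapses the duplicates before A ever runs).
def Pre_get_agg_tid (tid_obj : List (String × List Int)) : Prop :=
  (tid_obj.map Prod.fst).Nodup ∧
  ∀ p ∈ tid_obj, PySem.Str.slice p.1 none (some 1) ∈ (["1", "2", "3", "4"] : List String)
instance (tid_obj : List (String × List Int)) : Decidable (Pre_get_agg_tid tid_obj) := by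
  unfold Pre_get_agg_tid; infer_instance
def pvWitness_get_agg_tid : (List (String × List Int)) := [("1", [5]), ("23x", [7, -7]), ("2", [])]
def Spec_get_agg_tid (tid_obj : List (String × List Int)) (out : List (Int × List Int)) : Prop := out = get_agg_tid_alt tid_obj
instance (tid_obj : List (String × List Int)) (out : List (Int × List Int)) : Decidable (Spec_get_agg_tid tid_obj out) := by unfold Spec_get_agg_tid; infer_instance

-- ===== CLAIM (what is proved, stated in full; the proofs are below) =====
def Claim_equal_get_agg_tid : Prop := ∀ (tid_obj : List (String × List Int)), Dom_get_agg_tid tid_obj → Pre_get_agg_tid tid_obj → Spec_get_agg_tid tid_obj (get_agg_tid tid_obj)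

-- ===== LEMMAS AND PROOFS =====

-- the group of a pair: at_.index(t_[:1]) + 1 (0 in the ValueError case, which Pre_ excludes)
def pvK (p : String × List Int) : Int :=
  match PySem.List.index? (["1", "2", "3", "4"] : List String) (PySem.Str.slice p.1 none (some 1)) with
  | some k => (k : Int) + 1
  | none => 0

def pvStep (d : PySem.Dict Int (List Int)) (p : String × List Int) : PySem.Dict Int (List Int) :=
  d.modify (pvK p) [] (· ++ p.2)

theorem pvGetD_foldl (l : List (String × List Int)) (d : PySem.Dict Int (List Int)) (g : Int) :
    (l.foldl pvStep d).getD g [] =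
      d.getD g [] ++ (l.filter (fun p => pvK p == g)).flatMap (fun p => p.2) := by
  induction l generalizing d with
  | nil => simp
  | cons p l ih =>
    simp only [List.foldl_cons, List.filter_cons]
    by_cases h : pvK p = g
    · simp only [h, beq_self_eq_true, if_pos, List.flatMap_cons]
      rw [ih, pvStep, h, PySem.Dict.getD_modify_self, List.append_assoc]
    · have hb : (pvK p == g) = false := by simp [h]
      simp only [hb, if_neg, Bool.false_eq_true, not_false_iff]
      rw [ih, pvStep, PySem.Dict.getD_modify_of_ne _ _ _ (Ne.symm h)]

theorem pvLookup (tid_obj : List (String × List Int)) (h : (tid_obj.map Prod.fst).Nodup)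
    (p : String × List Int) (hp : p ∈ tid_obj) :
    (PySem.Dict.mk tid_obj).getD p.1 [] = p.2 := by
  refine PySem.Dict.getD_of_mem_items (PySem.Dict.mk tid_obj) ?_ ?_ []
  · exact hp
  · simpa [PySem.Dict.keys] using h

theorem pvA_eq_fold (tid_obj : List (String × List Int)) (h : Pre_get_agg_tid tid_obj) :
    get_agg_tid tid_obj = (tid_obj.foldl pvStep PySem.Dict.empty).items := by
  obtain ⟨hnd, hmem⟩ := h
  unfold get_agg_tid
  dsimp only
  congr 1
  apply PySem.List.foldl_congr_mem
  intro acc p hp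
  have hin := hmem p hp
  rw [← PySem.List.index?_isSome_iff] at hin
  obtain ⟨k, hk⟩ := Option.isSome_iff_exists.mp hin
  rw [hk]
  have hkey : pvK p = (k : Int) + 1 := by rw [pvK, hk]
  have hval := pvLookup tid_obj hnd p hp
  rw [pvStep, hkey, hval, PySem.Dict.modify]
  by_cases hc : acc.contains ((k : Int) + 1)
  · simp [hc]
  · rw [Bool.not_eq_true] at hc
    simp [hc, PySem.Dict.getD_of_not_contains _ _ hc]

theorem pvKeys_fold (tid_obj : List (String × List Int)) :
    (tid_obj.foldl pvStep PySem.Dict.empty).keys = PySem.List.dedup (tid_obj.map pvK) := by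
  have h := PySem.Dict.keys_foldl_modify_key tid_obj pvK ([] : List Int)
      (fun _ p v => v ++ p.2) PySem.Dict.empty
  have h2 : PySem.Set.update (PySem.Dict.empty : PySem.Dict Int (List Int)).keys
      (List.map pvK tid_obj) = PySem.List.dedup (List.map pvK tid_obj) := by
    simp [show (PySem.Dict.empty : PySem.Dict Int (List Int)).keys = PySem.Set.empty from rfl,
      PySem.Set.update_nil_left]
  exact h.trans h2

theorem pvB_eq (tid_obj : List (String × List Int)) (h : Pre_get_agg_tid tid_obj) :
    get_agg_tid_alt tid_obj =
      (PySem.List.dedup (tid_obj.map pvK)).map (fun g =>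
        (g, (tid_obj.filter (fun p => pvK p == g)).flatMap (fun p => p.2))) := by
  obtain ⟨hnd, _⟩ := h
  unfold get_agg_tid_alt
  dsimp only
  have hgroups : tid_obj.map (fun t_ =>
      match PySem.List.index? (["1", "2", "3", "4"] : List String)
        (PySem.Str.slice t_.1 none (some 1)) with
      | some k => (k : Int) + 1
      | none => 0) = tid_obj.map pvK := rfl
  rw [hgroups]
  have hz : tid_obj.zip (tid_obj.map pvK) = tid_obj.map (fun p => (p, pvK p)) := by
    have := @List.zip_map' _ _ _ id pvK tid_obj
    simp only [List.map_id, id_eq] at this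
    exact this
  rw [hz]
  apply List.map_congr_left
  intro g _
  rw [List.filter_map, List.flatMap_map]
  refine congrArg _ ?_
  apply List.flatMap_congr
  intro p hp
  exact pvLookup tid_obj hnd p (List.mem_of_mem_filter hp)

-- ===== VERDICT (by name: the statement is the Claim_ definition above) =====
theorem get_agg_tid_spec : Claim_equal_get_agg_tid := by
  intro tid_obj _ hpre
  unfold Spec_get_agg_tid
  rw [pvB_eq tid_obj hpre, pvA_eq_fold tid_obj hpre]
  have hnodup : (tid_obj.foldl pvStep PySem.Dict.empty).keys.Nodup := by
    have h := PySem.Dict.nodup_keys_foldl_modify_key tid_obj pvK ([] : List Int)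
        (fun _ p v => v ++ p.2) PySem.Dict.empty (by simp [PySem.Dict.keys, PySem.Dict.empty])
    exact h
  rw [PySem.Dict.items_eq_map_keys _ hnodup ([] : List Int), pvKeys_fold]
  apply List.map_congr_left
  intro g _
  rw [pvGetD_foldl]
  have he : (PySem.Dict.empty : PySem.Dict Int (List Int)).getD g [] = [] := rfl
  rw [he, List.nil_append]
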